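-- pv_equiv track=rewrite | github.com/CANToolz/CANToolz | modules/mod_stat.py | is_ascii
-- ===== SOURCE A (Python) =====
-- def is_ascii(text_array):
--     bool_ascii = False
--     ascii_cnt = 0
--     pre_byte = False
--
--     for byte in text_array:
--         if 31 < byte < 127:
--             if pre_byte:
--                 ascii_cnt += 1
--                 if ascii_cnt > 1:
--                     bool_ascii = True
--                     break
--             else:
--                 pre_byte = True
--         else:
--             pre_byte = False
--             ascii_cnt = 0
--
--     if ascii_cnt > 5:
--         bool_ascii = True
--
--     return bool_ascii
-- ===== SOURCE B (Python) =====
-- def is_ascii(text_array):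
--     for a, b, c in zip(text_array, text_array[1:], text_array[2:]):
--         if 31 < a < 127 and 31 < b < 127 and 31 < c < 127:
--             return True
--     return False
-- ===== Notes on version B (the rewrite author's own statement) =====
-- stated objective: simpler
-- what changed: Replaced the two-flag counter state machine (with a dead post-loop ascii_cnt > 5 branch) by a direct sliding-window scan over zip(xs, xs[1:], xs[2:]) that returns True on the first window of three printable bytes.
import Mathlib
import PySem

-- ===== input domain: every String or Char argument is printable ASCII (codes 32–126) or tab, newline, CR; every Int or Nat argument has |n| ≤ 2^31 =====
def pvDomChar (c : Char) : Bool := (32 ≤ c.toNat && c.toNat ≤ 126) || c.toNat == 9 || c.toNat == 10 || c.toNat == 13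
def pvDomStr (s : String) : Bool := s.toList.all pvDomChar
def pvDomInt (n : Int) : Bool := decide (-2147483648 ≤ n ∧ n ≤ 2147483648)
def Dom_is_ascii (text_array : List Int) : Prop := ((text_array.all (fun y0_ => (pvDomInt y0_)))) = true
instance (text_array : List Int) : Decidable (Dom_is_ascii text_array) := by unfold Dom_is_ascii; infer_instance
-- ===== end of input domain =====

-- B replaces A's two-flag counter state machine (whose post-loop `ascii_cnt > 5` branch is dead)
-- by a sliding-window scan over zipped triples; same O(n) cost, simpler.

-- ===== PORT A =====
-- literal transliteration of A's loop: state (ascii_cnt, pre_byte); `break` ≡ returning true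
-- immediately (bool_ascii is only ever set together with break); on normal exit the dead
-- `ascii_cnt > 5` check is kept as written.
def is_ascii_loop : List Int → Int → Bool → Bool
  | [], ascii_cnt, _ => decide (ascii_cnt > 5)
  | byte :: rest, ascii_cnt, pre_byte =>
    if 31 < byte ∧ byte < 127 then
      if pre_byte then
        if ascii_cnt + 1 > 1 then true
        else is_ascii_loop rest (ascii_cnt + 1) pre_byte
      else is_ascii_loop rest ascii_cnt true
    else is_ascii_loop rest 0 false

def is_ascii (text_array : List Int) : Bool := is_ascii_loop text_array 0 false

-- ===== PORT B =====
-- zip(xs, xs[1:], xs[2:]) ported as (xs.zip xs.tail).zip xs.tail.tail (xs[1:] = xs.tail exactly)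
def is_ascii_alt (text_array : List Int) : Bool :=
  ((text_array.zip text_array.tail).zip text_array.tail.tail).any
    (fun p => decide (31 < p.1.1 ∧ p.1.1 < 127) && decide (31 < p.1.2 ∧ p.1.2 < 127)
              && decide (31 < p.2 ∧ p.2 < 127))

-- ===== PRECONDITION & SPEC =====
def Spec_is_ascii (text_array : List Int) (out : Bool) : Prop := out = is_ascii_alt text_array
instance (text_array : List Int) (out : Bool) : Decidable (Spec_is_ascii text_array out) := by unfold Spec_is_ascii; infer_instance

-- ===== CLAIM (what is proved, stated in full; the proofs are below) =====
def Claim_equal_is_ascii : Prop := ∀ (text_array : List Int), Dom_is_ascii text_array → Spec_is_ascii text_array (is_ascii text_array)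

-- ===== LEMMAS AND PROOFS =====

def okb (b : Int) : Bool := decide (31 < b ∧ b < 127)

-- canonical "three consecutive printable bytes" recursion
def three : List Int → Bool
  | a :: b :: c :: r => (okb a && okb b && okb c) || three (b :: c :: r)
  | _ => false

theorem three_cons_not {a : Int} (ha : okb a = false) (xs : List Int) :
    three (a :: xs) = three xs := by
  match xs with
  | [] => simp [three]
  | [b] => simp [three]
  | b :: c :: r => simp [three, ha]

theorem three_mid_not {a b : Int} (hb : okb b = false) (xs : List Int) :
    three (a :: b :: xs) = three xs := by
  rw [show three (a :: b :: xs) = three (b :: xs) from ?_, three_cons_not hb]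
  match xs with
  | [] => simp [three]
  | c :: r => simp [three, hb]

theorem loopA_eq_three (xs : List Int) :
    (is_ascii_loop xs 0 false = three xs)
    ∧ (∀ a : Int, okb a = true → is_ascii_loop xs 0 true = three (a :: xs))
    ∧ (∀ a b : Int, okb a = true → okb b = true →
        is_ascii_loop xs 1 true = three (a :: b :: xs)) := by
  induction xs with
  | nil =>
    refine ⟨by simp [is_ascii_loop, three], ?_, ?_⟩
    · intro a _; simp [is_ascii_loop, three]
    · intro a b _ _; simp [is_ascii_loop, three]
  | cons x r ih =>
    obtain ⟨ih0, ih1, ih2⟩ := ih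
    by_cases hx : 31 < x ∧ x < 127
    · have hxb : okb x = true := by simp [okb, hx]
      refine ⟨?_, ?_, ?_⟩
      · simpa [is_ascii_loop, hx] using ih1 x hxb
      · intro a ha
        have := ih2 a x ha hxb
        simp only [is_ascii_loop, if_pos hx] at *
        simpa [is_ascii_loop, hx] using this
      · intro a b ha hb
        simp [is_ascii_loop, hx, three, ha, hb, hxb]
    · have hxb : okb x = false := by simp [okb, hx]
      refine ⟨?_, ?_, ?_⟩
      · rw [three_cons_not hxb]
        simpa [is_ascii_loop, hx] using ih0
      · intro a ha
        rw [three_mid_not hxb]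
        simpa [is_ascii_loop, hx] using ih0
      · intro a b ha hb
        have h3 : three (a :: b :: x :: r) = three r := by
          rw [show three (a :: b :: x :: r) = three (b :: x :: r) by simp [three, hxb],
            three_mid_not hxb]
        rw [h3]
        simpa [is_ascii_loop, hx] using ih0
  
theorem alt_eq_three (xs : List Int) : is_ascii_alt xs = three xs := by
  match xs with
  | [] => simp [is_ascii_alt, three]
  | [a] => simp [is_ascii_alt, three]
  | [a, b] => simp [is_ascii_alt, three]
  | a :: b :: c :: r =>
    have := alt_eq_three (b :: c :: r)
    simp only [is_ascii_alt, three, List.tail_cons, List.zip_cons_cons, List.any_cons] at *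
    rw [this]; simp [okb]

-- ===== VERDICT (by name: the statement is the Claim_ definition above) =====
theorem is_ascii_spec : Claim_equal_is_ascii := by
  intro xs _
  unfold Spec_is_ascii
  rw [alt_eq_three, show is_ascii xs = three xs from (loopA_eq_three xs).1]
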